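-- pv_equiv track=rewrite | github.com/trynthink/scout | scout/state_baseline_data_updater.py | generate_query_string
-- ===== SOURCE A (Python) =====
-- DATA_SERIES_DICT = {
--     'source-disposition': [
--         'direct-use', 'net-interstate-trade', 'estimated-losses',
--         'total-disposition', 'total-net-generation',
--         'total-international-imports'
--     ],
--     'emissions-by-state-by-fuel': ['co2-thousand-metric-tons'],
--     'retail-sales': ['price']
-- }
--
-- STATE_QUERY_STRING = (
--     '&facets[state][]=AL&facets[state][]=AR&facets[state][]=AZ' +
--     '&facets[state][]=CA&facets[state][]=CO&facets[state][]=CT' +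
--     '&facets[state][]=DC&facets[state][]=DE&facets[state][]=FL' +
--     '&facets[state][]=GA&facets[state][]=IA&facets[state][]=ID' +
--     '&facets[state][]=IL&facets[state][]=IN&facets[state][]=KS' +
--     '&facets[state][]=KY&facets[state][]=LA&facets[state][]=MA' +
--     '&facets[state][]=MD&facets[state][]=ME&facets[state][]=MI' +
--     '&facets[state][]=MN&facets[state][]=MO&facets[state][]=MS' +
--     '&facets[state][]=MT&facets[state][]=NC&facets[state][]=ND' +
--     '&facets[state][]=NE&facets[state][]=NH&facets[state][]=NJ' +
--     '&facets[state][]=NM&facets[state][]=NV&facets[state][]=NY' +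
--     '&facets[state][]=OH&facets[state][]=OK&facets[state][]=OR' +
--     '&facets[state][]=PA&facets[state][]=RI&facets[state][]=SC' +
--     '&facets[state][]=SD&facets[state][]=TN&facets[state][]=TX' +
--     '&facets[state][]=UT&facets[state][]=VA&facets[state][]=VT' +
--     '&facets[state][]=WA&facets[state][]=WI&facets[state][]=WV' +
--     '&facets[state][]=WY'
-- )
--
-- def generate_query_string(key, freq):
--     """Generate the EIA API query string for a given data series key and
--     frequency."""
--     base_url = 'https://api.eia.gov/v2/electricity'
--     query_params = {
--         'source-disposition': {
--             'url': f'{base_url}/state-electricity-profiles/{key}/data/',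
--             'frequency': freq[0],
--             'data': [
--                 f'data[{i}]={field}'
--                 for i, field in enumerate(DATA_SERIES_DICT[key])
--             ],
--             'sort': '&sort[0][column]=state&start=2015&sort[0][direction]=asc'
--                     '&offset=0&length=5000'
--         },
--         'emissions-by-state-by-fuel': {
--             'url': f'{base_url}/state-electricity-profiles/{key}/data/',
--             'frequency': freq[0],
--             'data': [f'data[0]={DATA_SERIES_DICT[key][0]}'],
--             'sort': '&sort[0][column]=stateid&start=2015&sort[0][direction]='
--                     'asc&offset=0&length=5000'
--         },
--         'retail-sales': {
--             'url': f'{base_url}/{key}/data/',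
--             'frequency': freq[0],
--             'data': [f'data[0]={DATA_SERIES_DICT[key][0]}'],
--             'sort': '&sort[0][column]=period&start=2015&sort[0][direction]='
--                     'desc&offset=0&length=5000'
--         }
--     }
--
--     params = query_params[key]
--     query_str = (
--         f"{params['url']}?frequency={params['frequency']}"
--         f"&{'&'.join(params['data'])}"
--         + (f"{STATE_QUERY_STRING.replace('state', 'stateid')}"
--             if key != 'source-disposition'
--             else STATE_QUERY_STRING)
--         + f"{params['sort']}"
--     )
--     return query_str
-- ===== SOURCE B (Python) =====
-- STATE_QUERY_STRING = (
--     '&facets[state][]=AL&facets[state][]=AR&facets[state][]=AZ' +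
--     '&facets[state][]=CA&facets[state][]=CO&facets[state][]=CT' +
--     '&facets[state][]=DC&facets[state][]=DE&facets[state][]=FL' +
--     '&facets[state][]=GA&facets[state][]=IA&facets[state][]=ID' +
--     '&facets[state][]=IL&facets[state][]=IN&facets[state][]=KS' +
--     '&facets[state][]=KY&facets[state][]=LA&facets[state][]=MA' +
--     '&facets[state][]=MD&facets[state][]=ME&facets[state][]=MI' +
--     '&facets[state][]=MN&facets[state][]=MO&facets[state][]=MS' +
--     '&facets[state][]=MT&facets[state][]=NC&facets[state][]=ND' +
--     '&facets[state][]=NE&facets[state][]=NH&facets[state][]=NJ' +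
--     '&facets[state][]=NM&facets[state][]=NV&facets[state][]=NY' +
--     '&facets[state][]=OH&facets[state][]=OK&facets[state][]=OR' +
--     '&facets[state][]=PA&facets[state][]=RI&facets[state][]=SC' +
--     '&facets[state][]=SD&facets[state][]=TN&facets[state][]=TX' +
--     '&facets[state][]=UT&facets[state][]=VA&facets[state][]=VT' +
--     '&facets[state][]=WA&facets[state][]=WI&facets[state][]=WV' +
--     '&facets[state][]=WY'
-- )
--
-- _SQID = STATE_QUERY_STRING.replace('state', 'stateid')
--
-- # The query string is a constant except for the frequency value, so the whole
-- # thing is precomputed ONCE at import time as a (prefix, suffix) template per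
-- # key; the function itself only splices freq[0] between the two halves.
-- _QUERY_TEMPLATES = {
--     'source-disposition': (
--         "https://api.eia.gov/v2/electricity/state-electricity-profiles/source-disposition/data/?frequency=",
--         "&data[0]=direct-use&data[1]=net-interstate-trade&data[2]=estimated-losses&data[3]=total-disposition&data[4]=total-net-generation&data[5]=total-international-imports" + STATE_QUERY_STRING
--         + "&sort[0][column]=state&start=2015&sort[0][direction]=asc&offset=0&length=5000"),
--     'emissions-by-state-by-fuel': (
--         "https://api.eia.gov/v2/electricity/state-electricity-profiles/emissions-by-state-by-fuel/data/?frequency=",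
--         '&data[0]=co2-thousand-metric-tons' + _SQID
--         + "&sort[0][column]=stateid&start=2015&sort[0][direction]=asc&offset=0&length=5000"),
--     'retail-sales': (
--         "https://api.eia.gov/v2/electricity/retail-sales/data/?frequency=",
--         '&data[0]=price' + _SQID
--         + "&sort[0][column]=period&start=2015&sort[0][direction]=desc&offset=0&length=5000"),
-- }
--
--
-- def generate_query_string(key, freq):
--     """Generate the EIA API query string for a given data series key and
--     frequency."""
--     prefix, suffix = _QUERY_TEMPLATES[key]
--     return prefix + freq[0] + suffix
-- ===== Notes on version B (the rewrite author's own statement) =====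
-- stated objective: simpler
-- what changed: B replaces A's per-call construction of the query string from parts (dict of records, enumerate comprehension, '&'.join and a runtime .replace on the facet string) with a table of fully precomputed (prefix, suffix) string templates per key; the function body is just prefix + freq[0] + suffix.
import Mathlib
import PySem

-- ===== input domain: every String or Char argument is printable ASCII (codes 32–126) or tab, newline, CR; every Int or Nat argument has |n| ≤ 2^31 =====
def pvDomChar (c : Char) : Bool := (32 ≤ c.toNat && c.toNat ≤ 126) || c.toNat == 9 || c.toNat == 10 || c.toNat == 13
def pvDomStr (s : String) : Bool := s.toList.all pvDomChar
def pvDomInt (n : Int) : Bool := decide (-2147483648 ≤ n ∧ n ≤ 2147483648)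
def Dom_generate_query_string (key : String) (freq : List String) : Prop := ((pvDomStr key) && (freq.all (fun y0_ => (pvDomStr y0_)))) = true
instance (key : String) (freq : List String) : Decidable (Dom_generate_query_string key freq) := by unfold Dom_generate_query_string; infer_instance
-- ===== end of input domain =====

-- B replaces A's per-call assembly of the query string from parts with a table of fully
-- precomputed (prefix, suffix) templates per key, splicing freq[0] between them; same
-- return value (simpler decomposition, no speed claim).


-- ===== PORT A =====
def DATA_SERIES_DICT : PySem.Dict String (List String) :=
  PySem.Dict.ofList [
    ("source-disposition",
      ["direct-use", "net-interstate-trade", "estimated-losses",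
       "total-disposition", "total-net-generation", "total-international-imports"]),
    ("emissions-by-state-by-fuel", ["co2-thousand-metric-tons"]),
    ("retail-sales", ["price"])]

def STATE_QUERY_STRING : String := "&facets[state][]=AL&facets[state][]=AR&facets[state][]=AZ&facets[state][]=CA&facets[state][]=CO&facets[state][]=CT&facets[state][]=DC&facets[state][]=DE&facets[state][]=FL&facets[state][]=GA&facets[state][]=IA&facets[state][]=ID&facets[state][]=IL&facets[state][]=IN&facets[state][]=KS&facets[state][]=KY&facets[state][]=LA&facets[state][]=MA&facets[state][]=MD&facets[state][]=ME&facets[state][]=MI&facets[state][]=MN&facets[state][]=MO&facets[state][]=MS&facets[state][]=MT&facets[state][]=NC&facets[state][]=ND&facets[state][]=NE&facets[state][]=NH&facets[state][]=NJ&facets[state][]=NM&facets[state][]=NV&facets[state][]=NY&facets[state][]=OH&facets[state][]=OK&facets[state][]=OR&facets[state][]=PA&facets[state][]=RI&facets[state][]=SC&facets[state][]=SD&facets[state][]=TN&facets[state][]=TX&facets[state][]=UT&facets[state][]=VA&facets[state][]=VT&facets[state][]=WA&facets[state][]=WI&facets[state][]=WV&facets[state][]=WY"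

-- Literal transliteration of A: the dict of per-key parameter records is built eagerly
-- (all three entries computed), then the key's record is looked up and assembled.
-- freq[0] and the DATA_SERIES_DICT / query_params lookups raise in Python on bad input;
-- those inputs are excluded by Pre_ below, so .getD defaults are never reached under Pre_.
def generate_query_string (key : String) (freq : List String) : String :=
  let base_url := "https://api.eia.gov/v2/electricity"
  let query_params : PySem.Dict String (String × String × List String × String) :=
    PySem.Dict.ofList [
      ("source-disposition",
        (base_url ++ "/state-electricity-profiles/" ++ key ++ "/data/",
         (PySem.List.pyGet? freq 0).getD "",
         (PySem.List.enumerate (DATA_SERIES_DICT.getD key [])).map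
           (fun p => "data[" ++ PySem.Int.toStr p.1 ++ "]=" ++ p.2),
         "&sort[0][column]=state&start=2015&sort[0][direction]=asc&offset=0&length=5000")),
      ("emissions-by-state-by-fuel",
        (base_url ++ "/state-electricity-profiles/" ++ key ++ "/data/",
         (PySem.List.pyGet? freq 0).getD "",
         ["data[0]=" ++ (PySem.List.pyGet? (DATA_SERIES_DICT.getD key []) 0).getD ""],
         "&sort[0][column]=stateid&start=2015&sort[0][direction]=asc&offset=0&length=5000")),
      ("retail-sales",
        (base_url ++ "/" ++ key ++ "/data/",
         (PySem.List.pyGet? freq 0).getD "",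
         ["data[0]=" ++ (PySem.List.pyGet? (DATA_SERIES_DICT.getD key []) 0).getD ""],
         "&sort[0][column]=period&start=2015&sort[0][direction]=desc&offset=0&length=5000"))]
  let params := (query_params.get? key).getD ("", "", [], "")
  params.1 ++ "?frequency=" ++ params.2.1 ++ "&" ++ PySem.Str.join "&" params.2.2.1
    ++ (if key != "source-disposition"
          then PySem.Str.replace STATE_QUERY_STRING "state" "stateid"
          else STATE_QUERY_STRING)
    ++ params.2.2.2

-- ===== PORT B =====
-- Module constants of Source B, computed once at import time.
def STATE_QUERY_STRING_STATEID : String :=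
  PySem.Str.replace STATE_QUERY_STRING "state" "stateid"

-- Source B's _QUERY_TEMPLATES: per key a fully precomputed (prefix, suffix) template.
def pvQueryTemplates : PySem.Dict String (String × String) :=
  PySem.Dict.ofList [
    ("source-disposition",
      ("https://api.eia.gov/v2/electricity/state-electricity-profiles/source-disposition/data/?frequency=",
       "&data[0]=direct-use&data[1]=net-interstate-trade&data[2]=estimated-losses&data[3]=total-disposition&data[4]=total-net-generation&data[5]=total-international-imports" ++ (STATE_QUERY_STRING ++ "&sort[0][column]=state&start=2015&sort[0][direction]=asc&offset=0&length=5000"))),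
    ("emissions-by-state-by-fuel",
      ("https://api.eia.gov/v2/electricity/state-electricity-profiles/emissions-by-state-by-fuel/data/?frequency=",
       "&data[0]=co2-thousand-metric-tons" ++ (STATE_QUERY_STRING_STATEID ++ "&sort[0][column]=stateid&start=2015&sort[0][direction]=asc&offset=0&length=5000"))),
    ("retail-sales",
      ("https://api.eia.gov/v2/electricity/retail-sales/data/?frequency=",
       "&data[0]=price" ++ (STATE_QUERY_STRING_STATEID ++ "&sort[0][column]=period&start=2015&sort[0][direction]=desc&offset=0&length=5000")))]

-- Literal transliteration of Source B's function: look the template up and splice freq[0] in.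
-- The unknown-key lookup raises KeyError in Python (excluded by Pre_, modelled as none).
def generate_query_string_alt (key : String) (freq : List String) : String :=
  match pvQueryTemplates.get? key with
  | none => ""
  | some (prefixStr, suffixStr) => prefixStr ++ ((PySem.List.pyGet? freq 0).getD "" ++ suffixStr)

-- ===== PRECONDITION & SPEC =====
-- Pre_ excludes exactly the inputs where Python A raises: a key outside DATA_SERIES_DICT
-- (KeyError while building the dict / on lookup) and an empty freq (IndexError on freq[0]).
def Pre_generate_query_string (key : String) (freq : List String) : Prop :=
  (key = "source-disposition" ∨ key = "emissions-by-state-by-fuel" ∨ key = "retail-sales")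
  ∧ freq ≠ []
instance (key : String) (freq : List String) : Decidable (Pre_generate_query_string key freq) := by unfold Pre_generate_query_string; infer_instance

def pvWitness_generate_query_string : String × List String := ("retail-sales", ["monthly"])

def Spec_generate_query_string (key : String) (freq : List String) (out : String) : Prop := out = generate_query_string_alt key freq
instance (key : String) (freq : List String) (out : String) : Decidable (Spec_generate_query_string key freq out) := by unfold Spec_generate_query_string; infer_instance

-- ===== CLAIM =====
def Claim_equal_generate_query_string : Prop := ∀ (key : String) (freq : List String), Dom_generate_query_string key freq → Pre_generate_query_string key freq → Spec_generate_query_string key freq (generate_query_string key freq)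

-- ===== LEMMAS AND PROOFS =====
set_option maxRecDepth 200000 in
set_option maxHeartbeats 1000000 in
theorem hJoin_sd : PySem.Str.join "&"
    ((PySem.List.enumerate ["direct-use", "net-interstate-trade", "estimated-losses", "total-disposition", "total-net-generation", "total-international-imports"]).map
      (fun p => "data[" ++ PySem.Int.toStr p.1 ++ "]=" ++ p.2))
    = "data[0]=direct-use&data[1]=net-interstate-trade&data[2]=estimated-losses&data[3]=total-disposition&data[4]=total-net-generation&data[5]=total-international-imports" := by decide

theorem hJoin_em : PySem.Str.join "&" ["data[0]=" ++ "co2-thousand-metric-tons"]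
    = "data[0]=co2-thousand-metric-tons" := by decide

theorem hJoin_rs : PySem.Str.join "&" ["data[0]=" ++ "price"] = "data[0]=price" := by decide

theorem hFreq (f : String) (r : List String) :
    (PySem.List.pyGet? (f :: r) 0).getD "" = f := by
  simp [pysem]

set_option maxRecDepth 100000 in
set_option maxHeartbeats 1000000 in
theorem gqs_source_disposition (f : String) (r : List String) :
    generate_query_string "source-disposition" (f :: r)
      = generate_query_string_alt "source-disposition" (f :: r) := by
  simp only [generate_query_string, generate_query_string_alt]
  rw [show ((PySem.Dict.ofList [
      ("source-disposition",
        ("https://api.eia.gov/v2/electricity" ++ "/state-electricity-profiles/" ++ "source-disposition" ++ "/data/",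
         (PySem.List.pyGet? (f :: r) 0).getD "",
         (PySem.List.enumerate (DATA_SERIES_DICT.getD "source-disposition" [])).map
           (fun p => "data[" ++ PySem.Int.toStr p.1 ++ "]=" ++ p.2),
         "&sort[0][column]=state&start=2015&sort[0][direction]=asc&offset=0&length=5000")),
      ("emissions-by-state-by-fuel",
        ("https://api.eia.gov/v2/electricity" ++ "/state-electricity-profiles/" ++ "source-disposition" ++ "/data/",
         (PySem.List.pyGet? (f :: r) 0).getD "",
         ["data[0]=" ++ (PySem.List.pyGet? (DATA_SERIES_DICT.getD "source-disposition" []) 0).getD ""],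
         "&sort[0][column]=stateid&start=2015&sort[0][direction]=asc&offset=0&length=5000")),
      ("retail-sales",
        ("https://api.eia.gov/v2/electricity" ++ "/" ++ "source-disposition" ++ "/data/",
         (PySem.List.pyGet? (f :: r) 0).getD "",
         ["data[0]=" ++ (PySem.List.pyGet? (DATA_SERIES_DICT.getD "source-disposition" []) 0).getD ""],
         "&sort[0][column]=period&start=2015&sort[0][direction]=desc&offset=0&length=5000"))]
    : PySem.Dict String (String × String × List String × String)).get? "source-disposition").getD ("", "", [], "")
    = ("https://api.eia.gov/v2/electricity" ++ "/state-electricity-profiles/" ++ "source-disposition" ++ "/data/",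
       (PySem.List.pyGet? (f :: r) 0).getD "",
       (PySem.List.enumerate ["direct-use", "net-interstate-trade", "estimated-losses", "total-disposition", "total-net-generation", "total-international-imports"]).map
       (fun p => "data[" ++ PySem.Int.toStr p.1 ++ "]=" ++ p.2),
       "&sort[0][column]=state&start=2015&sort[0][direction]=asc&offset=0&length=5000") from rfl]
  rw [show pvQueryTemplates.get? "source-disposition"
    = some ("https://api.eia.gov/v2/electricity/state-electricity-profiles/source-disposition/data/?frequency=",
        "&data[0]=direct-use&data[1]=net-interstate-trade&data[2]=estimated-losses&data[3]=total-disposition&data[4]=total-net-generation&data[5]=total-international-imports" ++ (STATE_QUERY_STRING ++ "&sort[0][column]=state&start=2015&sort[0][direction]=asc&offset=0&length=5000")) from rfl]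
  rw [hJoin_sd, hFreq]
  simp [String.append_assoc]

set_option maxRecDepth 100000 in
set_option maxHeartbeats 1000000 in
theorem gqs_emissions (f : String) (r : List String) :
    generate_query_string "emissions-by-state-by-fuel" (f :: r)
      = generate_query_string_alt "emissions-by-state-by-fuel" (f :: r) := by
  simp only [generate_query_string, generate_query_string_alt]
  rw [show ((PySem.Dict.ofList [
      ("source-disposition",
        ("https://api.eia.gov/v2/electricity" ++ "/state-electricity-profiles/" ++ "emissions-by-state-by-fuel" ++ "/data/",
         (PySem.List.pyGet? (f :: r) 0).getD "",
         (PySem.List.enumerate (DATA_SERIES_DICT.getD "emissions-by-state-by-fuel" [])).map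
           (fun p => "data[" ++ PySem.Int.toStr p.1 ++ "]=" ++ p.2),
         "&sort[0][column]=state&start=2015&sort[0][direction]=asc&offset=0&length=5000")),
      ("emissions-by-state-by-fuel",
        ("https://api.eia.gov/v2/electricity" ++ "/state-electricity-profiles/" ++ "emissions-by-state-by-fuel" ++ "/data/",
         (PySem.List.pyGet? (f :: r) 0).getD "",
         ["data[0]=" ++ (PySem.List.pyGet? (DATA_SERIES_DICT.getD "emissions-by-state-by-fuel" []) 0).getD ""],
         "&sort[0][column]=stateid&start=2015&sort[0][direction]=asc&offset=0&length=5000")),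
      ("retail-sales",
        ("https://api.eia.gov/v2/electricity" ++ "/" ++ "emissions-by-state-by-fuel" ++ "/data/",
         (PySem.List.pyGet? (f :: r) 0).getD "",
         ["data[0]=" ++ (PySem.List.pyGet? (DATA_SERIES_DICT.getD "emissions-by-state-by-fuel" []) 0).getD ""],
         "&sort[0][column]=period&start=2015&sort[0][direction]=desc&offset=0&length=5000"))]
    : PySem.Dict String (String × String × List String × String)).get? "emissions-by-state-by-fuel").getD ("", "", [], "")
    = ("https://api.eia.gov/v2/electricity" ++ "/state-electricity-profiles/" ++ "emissions-by-state-by-fuel" ++ "/data/",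
       (PySem.List.pyGet? (f :: r) 0).getD "",
       ["data[0]=" ++ "co2-thousand-metric-tons"],
       "&sort[0][column]=stateid&start=2015&sort[0][direction]=asc&offset=0&length=5000") from rfl]
  rw [show pvQueryTemplates.get? "emissions-by-state-by-fuel"
    = some ("https://api.eia.gov/v2/electricity/state-electricity-profiles/emissions-by-state-by-fuel/data/?frequency=",
        "&data[0]=co2-thousand-metric-tons" ++ (PySem.Str.replace STATE_QUERY_STRING "state" "stateid" ++ "&sort[0][column]=stateid&start=2015&sort[0][direction]=asc&offset=0&length=5000")) from rfl]
  rw [hJoin_em, hFreq]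
  simp [String.append_assoc]

set_option maxRecDepth 100000 in
set_option maxHeartbeats 1000000 in
theorem gqs_retail (f : String) (r : List String) :
    generate_query_string "retail-sales" (f :: r)
      = generate_query_string_alt "retail-sales" (f :: r) := by
  simp only [generate_query_string, generate_query_string_alt]
  rw [show ((PySem.Dict.ofList [
      ("source-disposition",
        ("https://api.eia.gov/v2/electricity" ++ "/state-electricity-profiles/" ++ "retail-sales" ++ "/data/",
         (PySem.List.pyGet? (f :: r) 0).getD "",
         (PySem.List.enumerate (DATA_SERIES_DICT.getD "retail-sales" [])).map
           (fun p => "data[" ++ PySem.Int.toStr p.1 ++ "]=" ++ p.2),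
         "&sort[0][column]=state&start=2015&sort[0][direction]=asc&offset=0&length=5000")),
      ("emissions-by-state-by-fuel",
        ("https://api.eia.gov/v2/electricity" ++ "/state-electricity-profiles/" ++ "retail-sales" ++ "/data/",
         (PySem.List.pyGet? (f :: r) 0).getD "",
         ["data[0]=" ++ (PySem.List.pyGet? (DATA_SERIES_DICT.getD "retail-sales" []) 0).getD ""],
         "&sort[0][column]=stateid&start=2015&sort[0][direction]=asc&offset=0&length=5000")),
      ("retail-sales",
        ("https://api.eia.gov/v2/electricity" ++ "/" ++ "retail-sales" ++ "/data/",
         (PySem.List.pyGet? (f :: r) 0).getD "",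
         ["data[0]=" ++ (PySem.List.pyGet? (DATA_SERIES_DICT.getD "retail-sales" []) 0).getD ""],
         "&sort[0][column]=period&start=2015&sort[0][direction]=desc&offset=0&length=5000"))]
    : PySem.Dict String (String × String × List String × String)).get? "retail-sales").getD ("", "", [], "")
    = ("https://api.eia.gov/v2/electricity" ++ "/" ++ "retail-sales" ++ "/data/",
       (PySem.List.pyGet? (f :: r) 0).getD "",
       ["data[0]=" ++ "price"],
       "&sort[0][column]=period&start=2015&sort[0][direction]=desc&offset=0&length=5000") from rfl]
  rw [show pvQueryTemplates.get? "retail-sales"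
    = some ("https://api.eia.gov/v2/electricity/retail-sales/data/?frequency=",
        "&data[0]=price" ++ (PySem.Str.replace STATE_QUERY_STRING "state" "stateid" ++ "&sort[0][column]=period&start=2015&sort[0][direction]=desc&offset=0&length=5000")) from rfl]
  rw [hJoin_rs, hFreq]
  simp [String.append_assoc]

-- ===== VERDICT =====
theorem generate_query_string_spec : Claim_equal_generate_query_string := by
  intro key freq _ hpre
  obtain ⟨hk, hf⟩ := hpre
  obtain ⟨f, r, rfl⟩ : ∃ f r, freq = f :: r := by
    cases freq with
    | nil => exact absurd rfl hf
    | cons f r => exact ⟨f, r, rfl⟩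
  rcases hk with rfl | rfl | rfl
  · exact gqs_source_disposition f r
  · exact gqs_emissions f r
  · exact gqs_retail f r
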